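-- pv_equiv track=rewrite | github.com/Pokrywkaa/CTCI | LinkedLists/nokia.py | solution
-- ===== SOURCE A (Python) =====
-- def solution(s):
--     count=0
--     smallest=s[0]
--     for i in s[1:]:
--         if smallest>=i:
--             count+=1
--             smallest=i
--     return count
-- ===== SOURCE B (Python) =====
-- def solution(s):
--     # pass 1: prefix-minimum table
--     pm = []
--     m = None
--     for x in s:
--         m = x if m is None else min(m, x)
--         pm.append(m)
--     # pass 2: count elements not above the previous prefix minimum
--     return sum(1 for x, m in zip(s[1:], pm) if m >= x)
-- ===== Notes on version B (the rewrite author's own statement) =====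
-- stated objective: alternative
-- what changed: Replaces the single stateful running-minimum loop with a two-pass table decomposition: first materialize the prefix-minimum list, then count in a separate zip pass.
import Mathlib
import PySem

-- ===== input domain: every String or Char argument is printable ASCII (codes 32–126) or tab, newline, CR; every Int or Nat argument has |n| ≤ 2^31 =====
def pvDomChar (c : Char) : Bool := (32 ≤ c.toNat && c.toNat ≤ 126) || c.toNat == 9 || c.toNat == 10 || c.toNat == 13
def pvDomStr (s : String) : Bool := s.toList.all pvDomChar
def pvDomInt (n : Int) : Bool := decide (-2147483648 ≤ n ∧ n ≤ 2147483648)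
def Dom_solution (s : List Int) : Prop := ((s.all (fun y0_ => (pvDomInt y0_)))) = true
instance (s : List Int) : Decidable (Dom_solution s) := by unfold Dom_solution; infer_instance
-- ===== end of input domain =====

-- B replaces A's stateful running-minimum loop by a two-pass decomposition
-- (prefix-minimum table, then a counting pass); same O(n) cost, return value only.

-- ===== PORT A =====
-- single loop: state (count, smallest), over s[1:]; s[0] raises on [] (excluded by Pre_)
def solution (s : List Int) : Int :=
  match s with
  | [] => 0   -- unreachable under Pre_solution: Python raises IndexError at s[0]
  | h :: t =>
    (t.foldl (fun (st : Int × Int) i => if st.2 ≥ i then (st.1 + 1, i) else st)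
      ((0 : Int), h)).1

-- ===== PORT B =====
-- pass 1 of Source B: pm list, with m : Option Int starting at None
def altPrefMins : List Int → Option Int → List Int
  | [], _ => []
  | x :: xs, none => x :: altPrefMins xs (some x)
  | x :: xs, some m => min m x :: altPrefMins xs (some (min m x))

-- pass 2 of Source B: sum over zip(s[1:], pm)
def solution_alt (s : List Int) : Int :=
  ((s.drop 1).zip (altPrefMins s none)).foldl
    (fun (c : Int) p => if p.2 ≥ p.1 then c + 1 else c) 0

-- ===== PRECONDITION & SPEC =====
-- Pre_ excludes only the empty list, on which A raises IndexError at s[0].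
def Pre_solution (s : List Int) : Prop := s ≠ []
instance (s : List Int) : Decidable (Pre_solution s) := by unfold Pre_solution; infer_instance
def pvWitness_solution : List Int := [3, 1, 2, 1]

def Spec_solution (s : List Int) (out : Int) : Prop := out = solution_alt s
instance (s : List Int) (out : Int) : Decidable (Spec_solution s out) := by unfold Spec_solution; infer_instance

-- ===== CLAIM (what is proved, stated in full; the proofs are below) =====
def Claim_equal_solution : Prop := ∀ (s : List Int), Dom_solution s → Pre_solution s → Spec_solution s (solution s)

-- ===== LEMMAS AND PROOFS =====

-- abstract count both sides reduce to
def cnt : List Int → Int → Int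
  | [], _ => 0
  | x :: xs, m => (if m ≥ x then 1 else 0) + cnt xs (min m x)

theorem foldA_eq_cnt (t : List Int) (m c : Int) :
    (t.foldl (fun (st : Int × Int) i => if st.2 ≥ i then (st.1 + 1, i) else st) (c, m)).1
      = c + cnt t m := by
  induction t generalizing m c with
  | nil => simp [cnt]
  | cons x xs ih =>
    simp only [List.foldl, cnt]
    by_cases h : m ≥ x
    · have : min m x = x := min_eq_right h
      simp [h, this, ih]; omega
    · have hm : min m x = m := min_eq_left (by omega)
      simp [h, hm, ih]

theorem foldB_eq_cnt (t : List Int) (m c : Int) :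
    ((t.zip (m :: altPrefMins t (some m))).foldl
      (fun (c : Int) p => if p.2 ≥ p.1 then c + 1 else c) c) = c + cnt t m := by
  induction t generalizing m c with
  | nil => simp [cnt]
  | cons x xs ih =>
    simp only [altPrefMins, List.zip_cons_cons, List.foldl_cons, cnt]
    rw [ih]
    by_cases h : m ≥ x
    · simp [h]; omega
    · simp [h]

-- ===== VERDICT (by name: the statement is the Claim_ definition above) =====
theorem solution_spec : Claim_equal_solution := by
  intro s _ hpre
  unfold Spec_solution
  match s with
  | [] => exact absurd rfl hpre
  | h :: t =>
    show (t.foldl _ ((0 : Int), h)).1 = _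
    rw [foldA_eq_cnt]
    unfold solution_alt
    simp only [List.drop, altPrefMins]
    rw [foldB_eq_cnt]
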